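-- pv_equiv track=rewrite | github.com/KHJun99/Algorithm | 백준/Silver/2635. 수 이어가기/수 이어가기.py | make_num
-- ===== SOURCE A (Python) =====
-- def make_num(start):
--     max_seq = []
--
--     for idx in range(start, 0, -1):
--         seq = [start, idx]
--
--         while True:
--             next_num = seq[-2] - seq[-1]
--
--             if next_num < 0:
--                 break
--
--             seq.append(next_num)
--
--         if len(seq) > len(max_seq):
--             max_seq = seq
--
--     return max_seq
-- ===== SOURCE B (Python) =====
-- def make_num(start):
--     # Interval narrowing on the second term: the chain [a, b, a-b, ...] keeps its
--     # n-th term nonnegative iff b lies in a half-line with Fibonacci coefficients,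
--     # so {b : chain length >= n} is an interval; shrink it one constraint at a
--     # time until it would become empty, take its top end (the largest optimal
--     # second term, matching the tie-break), and rebuild the single best chain.
--     if start < 1:
--         return []
--     lo, hi = 1, start
--     f1, f2 = 1, 1  # consecutive Fibonacci numbers F(n-1), F(n)
--     while True:
--         # even-indexed term F(n-1)*a - F(n)*b >= 0  <=>  b <= F(n-1)*a // F(n)
--         nhi = min(hi, (f1 * start) // f2)
--         if nhi < lo:
--             break
--         hi = nhi
--         f1, f2 = f2, f1 + f2
--         # odd-indexed term F(n)*b - F(n-1)*a >= 0  <=>  b >= ceil(F(n-1)*a / F(n))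
--         nlo = max(lo, -((-(f1 * start)) // f2))
--         if nlo > hi:
--             break
--         lo = nlo
--         f1, f2 = f2, f1 + f2
--     seq = [start, hi]
--     while True:
--         next_num = seq[-2] - seq[-1]
--         if next_num < 0:
--             break
--         seq.append(next_num)
--     return seq
-- ===== Notes on version B (the rewrite author's own statement) =====
-- stated objective: faster
-- what changed: Instead of running a subtraction chain for every candidate second term (O(n) candidates), B narrows the interval of second terms that survive each Fibonacci-coefficient sign constraint, takes the top end of the last nonempty interval (the largest optimal second term, matching A's tie-break), and rebuilds the single best chain once.
import Mathlib
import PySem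

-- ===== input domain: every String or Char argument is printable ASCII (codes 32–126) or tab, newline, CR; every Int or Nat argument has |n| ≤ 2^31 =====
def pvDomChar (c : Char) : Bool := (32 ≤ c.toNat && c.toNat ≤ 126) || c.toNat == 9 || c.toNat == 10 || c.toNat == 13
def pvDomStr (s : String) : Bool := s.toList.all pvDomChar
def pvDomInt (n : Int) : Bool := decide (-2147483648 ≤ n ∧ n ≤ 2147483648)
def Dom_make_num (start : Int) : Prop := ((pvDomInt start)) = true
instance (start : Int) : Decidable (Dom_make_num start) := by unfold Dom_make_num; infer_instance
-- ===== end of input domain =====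

-- B replaces A's scan over every candidate second term by Fibonacci-coefficient
-- interval narrowing on the second term plus a single chain reconstruction (faster in a timing run).

-- ===== PORT A =====
-- A's inner `while True` loop (fuel-guarded; the proof shows the loop stops long before the fuel runs out on the stated domain)
def pvTailA : Nat → List Int → List Int
  | 0, seq => seq
  | fuel+1, seq =>
    let next_num := PySem.List.pyGetD seq (-2) 0 - PySem.List.pyGetD seq (-1) 0
    if next_num < 0 then seq else pvTailA fuel (seq ++ [next_num])

def make_num (start : Int) : List Int :=
  (PySem.List.pyRange start 0 (-1)).foldl
    (fun max_seq idx =>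
      let seq := pvTailA 100 [start, idx]
      if seq.length > max_seq.length then seq else max_seq) []

-- ===== PORT B =====
-- B's `while True` narrowing loop (fuel-guarded; the proof shows it stops long before the fuel runs out on the stated domain)
def pvNarrowB : Nat → Int → Int → Int → Int → Int → Int × Int
  | 0, _, _, _, lo, hi => (lo, hi)
  | fuel+1, start, f1, f2, lo, hi =>
    let nhi := min hi (PySem.Int.floordiv (f1 * start) f2)
    if nhi < lo then (lo, hi)
    else
      let g1 := f2
      let g2 := f1 + f2
      let nlo := max lo (-PySem.Int.floordiv (-(g1 * start)) g2)
      if nlo > nhi then (lo, nhi)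
      else pvNarrowB fuel start g2 (g1 + g2) nlo nhi

-- B's final reconstruction loop (the same subtraction loop Source B ends with)
def pvTailB : Nat → List Int → List Int
  | 0, seq => seq
  | fuel+1, seq =>
    let next_num := PySem.List.pyGetD seq (-2) 0 - PySem.List.pyGetD seq (-1) 0
    if next_num < 0 then seq else pvTailB fuel (seq ++ [next_num])

def make_num_alt (start : Int) : List Int :=
  if start < 1 then []
  else
    let lohi := pvNarrowB 100 start 1 1 1 start
    pvTailB 100 [start, lohi.2]

-- ===== PRECONDITION & SPEC =====
def Spec_make_num (start : Int) (out : List Int) : Prop := out = make_num_alt start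
instance (start : Int) (out : List Int) : Decidable (Spec_make_num start out) := by unfold Spec_make_num; infer_instance

-- ===== CLAIM (what is proved, stated in full; the proofs are below) =====
def Claim_equal_make_num : Prop := ∀ (start : Int), Dom_make_num start → Spec_make_num start (make_num start)

-- ===== LEMMAS AND PROOFS =====

-- the abstract chain: pvT a b 0 = a, pvT a b 1 = b, then successive differences
def pvT (a b : Int) : Nat → Int
  | 0 => a
  | 1 => b
  | n+2 => pvT a b n - pvT a b (n+1)

-- "the chain of (a, b) is nonnegative through index m"
def pvGood (a b : Int) (m : Nat) : Prop := ∀ j, 2 ≤ j → j ≤ m → 0 ≤ pvT a b j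

-- the terms the subtraction loop appends after the first two
def pvChainT : Nat → Int → Int → List Int
  | 0, _, _ => []
  | fuel+1, u, v => if u - v < 0 then [] else (u - v) :: pvChainT fuel v (u - v)

lemma pvT_shift (u v : Int) : ∀ i, pvT v (u - v) i = pvT u v (i+1) := by
  intro i
  induction i using Nat.twoStepInduction with
  | zero => simp [pvT]
  | one => simp [pvT]
  | more n ih1 ih2 => simp only [pvT, ih1, ih2]

-- Fibonacci lower bound: a chain nonnegative through index m+1 forces Fibonacci growth
lemma pvFibBound : ∀ m (u v : Int), 0 ≤ u → 0 ≤ v → 1 ≤ u + v →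
    (∀ i, i ≤ m + 1 → 0 ≤ pvT u v i) →
    (Nat.fib m : Int) ≤ u ∧ (Nat.fib (m+1) : Int) ≤ u + v := by
  intro m
  induction m with
  | zero =>
    intro u v hu hv hs h
    constructor
    · simpa using hu
    · simpa using hs
  | succ m ih =>
    intro u v hu hv hs h
    have h2 : 0 ≤ pvT u v 2 := h 2 (by omega)
    have h2' : pvT u v 2 = u - v := by simp [pvT]
    have hu1 : 1 ≤ u := by
      rcases lt_or_ge u 1 with hlt | hge
      · have hu0 : u = 0 := by omega
        have : v = 0 := by rw [h2', hu0] at h2; omega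
        omega
      · exact hge
    have ihres := ih v (u - v) hv (by omega) (by omega)
      (fun i hi => by rw [pvT_shift]; exact h (i+1) (by omega))
    obtain ⟨i1, i2⟩ := ihres
    constructor
    · omega
    · show (Nat.fib (m+2) : Int) ≤ u + v
      have : (Nat.fib (m+2) : Int) = (Nat.fib m : Int) + (Nat.fib (m+1) : Int) := by
        rw [Nat.fib_add_two]; push_cast; ring
      omega

lemma pvGood_mono (a b : Int) {m m' : Nat} (h : m' ≤ m) (hg : pvGood a b m) : pvGood a b m' :=
  fun j h2 hj => hg j h2 (le_trans hj h)

lemma pvNoGood48 (a b : Int) (ha : 1 ≤ a) (hb : 1 ≤ b) (hba : b ≤ a)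
    (haM : a ≤ 2147483648) : ¬ pvGood a b 48 := by
  intro hg
  have hcons : ∀ i, i ≤ 48 → 0 ≤ pvT a b i := by
    intro i hi
    rcases Nat.lt_or_ge i 2 with h | h
    · interval_cases i <;> (simp [pvT]; omega)
    · exact hg i h hi
  have hbd := pvFibBound 47 a b (by omega) (by omega) (by omega) hcons
  have hfib : Nat.fib 48 = 4807526976 := by decide
  rw [show (47:Nat)+1 = 48 from rfl, hfib] at hbd
  omega

lemma pvGood_succ_iff (a b : Int) (m : Nat) (hm : 1 ≤ m) :
    pvGood a b (m+1) ↔ pvGood a b m ∧ 0 ≤ pvT a b (m+1) := by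
  constructor
  · intro h
    exact ⟨fun j h2 hj => h j h2 (by omega), h (m+1) (by omega) (by omega)⟩
  · intro ⟨h1, h2⟩ j hj2 hjm
    rcases Nat.lt_or_ge j (m+1) with h | h
    · exact h1 j hj2 (by omega)
    · have : j = m + 1 := by omega
      rw [this]; exact h2

-- Fibonacci coefficients of the chain terms
lemma pvT_fib (a b : Int) : ∀ i,
    pvT a b (2*i+2) = (Nat.fib (2*i+1) : Int) * a - (Nat.fib (2*i+2) : Int) * b ∧
    pvT a b (2*i+3) = (Nat.fib (2*i+3) : Int) * b - (Nat.fib (2*i+2) : Int) * a := by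
  intro i
  induction i with
  | zero => constructor <;> simp [pvT, Nat.fib] <;> ring
  | succ i ih =>
    obtain ⟨ih1, ih2⟩ := ih
    have e1 : 2*(i+1)+2 = (2*i+2)+2 := by ring
    have e2 : 2*(i+1)+3 = (2*i+3)+2 := by ring
    have hf4 : (Nat.fib (2*i+4) : Int) = (Nat.fib (2*i+2) : Int) + (Nat.fib (2*i+3) : Int) := by
      rw [show 2*i+4 = (2*i+2)+2 from by ring, Nat.fib_add_two]; push_cast; ring
    have hf5 : (Nat.fib (2*i+5) : Int) = (Nat.fib (2*i+3) : Int) + (Nat.fib (2*i+4) : Int) := by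
      rw [show 2*i+5 = (2*i+3)+2 from by ring, Nat.fib_add_two]; push_cast; ring
    have hf3 : (Nat.fib (2*i+3) : Int) = (Nat.fib (2*i+1) : Int) + (Nat.fib (2*i+2) : Int) := by
      rw [show 2*i+3 = (2*i+1)+2 from by ring, Nat.fib_add_two]; push_cast; ring
    have t4 : pvT a b (2*i+4) = pvT a b (2*i+2) - pvT a b (2*i+3) := by
      rw [show 2*i+4 = (2*i+2)+2 from by ring]; simp [pvT]
    have t5 : pvT a b (2*i+5) = pvT a b (2*i+3) - pvT a b (2*i+4) := by
      rw [show 2*i+5 = (2*i+3)+2 from by ring]; simp [pvT]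
    constructor
    · rw [e1, show (2*i+2)+2 = 2*i+4 from by ring, t4, ih1, ih2,
        show 2*(i+1)+1 = 2*i+3 from by ring, hf4, hf3]
      ring
    · rw [e2, show (2*i+3)+2 = 2*i+5 from by ring, t5, t4, ih1, ih2,
        show 2*(i+1)+2 = 2*i+4 from by ring, hf5, hf4, hf3]
      ring

lemma pvGetD_m2 (xs : List Int) (u v : Int) :
    PySem.List.pyGetD (xs ++ [u, v]) (-2) 0 = u := by
  rw [PySem.List.pyGetD_neg_ofNat (xs ++ [u, v]) 2 0 (by omega) (by simp)]
  simp

lemma pvGetD_m1 (xs : List Int) (u v : Int) :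
    PySem.List.pyGetD (xs ++ [u, v]) (-1) 0 = v := by
  have h : xs ++ [u, v] = (xs ++ [u]) ++ [v] := by simp
  rw [h, PySem.List.pyGetD_neg_one_append_singleton]

lemma pvTailA_append : ∀ fuel xs u v,
    pvTailA fuel (xs ++ [u, v]) = (xs ++ [u, v]) ++ pvChainT fuel u v := by
  intro fuel
  induction fuel with
  | zero => intro xs u v; simp [pvTailA, pvChainT]
  | succ f ih =>
    intro xs u v
    simp only [pvTailA, pvChainT, pvGetD_m2, pvGetD_m1]
    split
    · simp
    · have h : (xs ++ [u, v]) ++ [u - v] = (xs ++ [u]) ++ [v, u - v] := by simp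
      rw [h, ih (xs ++ [u]) v (u - v)]
      simp

lemma pvChainT_spec1 (a b : Int) : ∀ fuel n,
    (∀ i < (pvChainT fuel (pvT a b n) (pvT a b (n+1))).length, 0 ≤ pvT a b (n+2+i)) ∧
    ((pvChainT fuel (pvT a b n) (pvT a b (n+1))).length < fuel →
      pvT a b (n+2+(pvChainT fuel (pvT a b n) (pvT a b (n+1))).length) < 0) ∧
    (pvChainT fuel (pvT a b n) (pvT a b (n+1))).length ≤ fuel := by
  intro fuel
  induction fuel with
  | zero => intro n; simp [pvChainT]
  | succ f ih =>
    intro n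
    have hd : pvT a b n - pvT a b (n+1) = pvT a b (n+2) := by simp [pvT]
    simp only [pvChainT, hd]
    split
    · rename_i hneg
      refine ⟨by simp, ?_, by simp⟩
      intro _
      simpa using hneg
    · rename_i hpos
      rw [not_lt] at hpos
      have ih' := ih (n+1)
      rw [show n+1+1 = n+2 from rfl] at ih'
      obtain ⟨i1, i2, i3⟩ := ih'
      set L := (pvChainT f (pvT a b (n+1)) (pvT a b (n+2))).length with hL
      refine ⟨?_, ?_, by simp [List.length_cons]; omega⟩
      · intro i hi
        simp only [List.length_cons] at hi
        match i with
        | 0 => simpa using hpos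
        | j+1 =>
          have := i1 j (by omega)
          rw [show n+2+(j+1) = n+1+2+j from by ring]
          exact this
      · intro h
        simp only [List.length_cons] at h ⊢
        have := i2 (by omega)
        rw [show n+2+(L+1) = n+1+2+L from by ring]
        exact this

lemma pvChainT_spec2 (a b : Int) : ∀ fuel n k, k ≤ fuel →
    (∀ i < k, 0 ≤ pvT a b (n+2+i)) →
    k ≤ (pvChainT fuel (pvT a b n) (pvT a b (n+1))).length := by
  intro fuel
  induction fuel with
  | zero => intro n k h _; omega
  | succ f ih =>
    intro n k hk hgood
    have hd : pvT a b n - pvT a b (n+1) = pvT a b (n+2) := by simp [pvT]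
    simp only [pvChainT, hd]
    match k with
    | 0 => omega
    | k+1 =>
      have h0 : 0 ≤ pvT a b (n+2) := by simpa using hgood 0 (by omega)
      rw [if_neg (by omega)]
      simp only [List.length_cons]
      have := ih (n+1) k (by omega) (fun i hi => by
        rw [show n+1+2+i = n+2+(i+1) from by ring]; exact hgood (i+1) (by omega))
      rw [show n+1+1 = n+2 from rfl] at this
      omega

lemma pvCeilLe (p q b : Int) (hq : 0 < q) :
    (-PySem.Int.floordiv (-p) q) ≤ b ↔ p ≤ b * q := by
  rw [neg_le, PySem.Int.le_floordiv_iff_mul_le hq]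
  constructor <;> intro h <;> nlinarith

-- correctness of the narrowing loop: its second component is the largest second
-- term whose chain is nonnegative through some index m that no admissible second term survives past
lemma pvNarrow_rec (a : Int) (ha : 1 ≤ a) (haM : a ≤ 2147483648) :
    ∀ fuel k lo hi, 48 ≤ 2*fuel + 2*k + 1 →
    (∀ b : Int, (lo ≤ b ∧ b ≤ hi) ↔ (1 ≤ b ∧ b ≤ a ∧ pvGood a b (2*k+1))) →
    lo ≤ hi →
    ∃ m : Nat,
      (1 ≤ (pvNarrowB fuel a (Nat.fib (2*k+1)) (Nat.fib (2*k+2)) lo hi).2 ∧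
       (pvNarrowB fuel a (Nat.fib (2*k+1)) (Nat.fib (2*k+2)) lo hi).2 ≤ a ∧
       pvGood a (pvNarrowB fuel a (Nat.fib (2*k+1)) (Nat.fib (2*k+2)) lo hi).2 m) ∧
      (∀ b : Int, 1 ≤ b → b ≤ a → pvGood a b m → b ≤ (pvNarrowB fuel a (Nat.fib (2*k+1)) (Nat.fib (2*k+2)) lo hi).2) ∧
      (∀ b : Int, 1 ≤ b → b ≤ a → ¬ pvGood a b (m+1)) := by
  intro fuel
  induction fuel with
  | zero =>
    intro k lo hi hfuel hiv hle
    exfalso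
    have hhi := (hiv hi).mp ⟨hle, le_refl hi⟩
    exact pvNoGood48 a hi ha hhi.1 hhi.2.1 haM (pvGood_mono a hi (m := 2*k+1) (by omega) hhi.2.2)
  | succ f ih =>
    intro k lo hi hfuel hiv hle
    have hF1pos : (0:Int) < (Nat.fib (2*k+1) : Int) := by
      exact_mod_cast Nat.fib_pos.mpr (by omega)
    have hF2pos : (0:Int) < (Nat.fib (2*k+2) : Int) := by
      exact_mod_cast Nat.fib_pos.mpr (by omega)
    have hF3pos : (0:Int) < (Nat.fib (2*k+3) : Int) := by
      exact_mod_cast Nat.fib_pos.mpr (by omega)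
    have hf3 : (Nat.fib (2*k+3) : Int) = (Nat.fib (2*k+1) : Int) + (Nat.fib (2*k+2) : Int) := by
      rw [show 2*k+3 = (2*k+1)+2 from by ring, Nat.fib_add_two]; push_cast; ring
    have hf4 : (Nat.fib (2*k+4) : Int) = (Nat.fib (2*k+2) : Int) + (Nat.fib (2*k+3) : Int) := by
      rw [show 2*k+4 = (2*k+2)+2 from by ring, Nat.fib_add_two]; push_cast; ring
    set nhi := min hi (PySem.Int.floordiv ((Nat.fib (2*k+1) : Int) * a) (Nat.fib (2*k+2) : Int)) with hnhi_def
    set nlo := max lo (-PySem.Int.floordiv (-((Nat.fib (2*k+2) : Int) * a)) ((Nat.fib (2*k+1) : Int) + (Nat.fib (2*k+2) : Int))) with hnlo_def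
    have hEven : ∀ b : Int, b ≤ PySem.Int.floordiv ((Nat.fib (2*k+1) : Int) * a) (Nat.fib (2*k+2) : Int) ↔ 0 ≤ pvT a b (2*k+2) := by
      intro b
      rw [PySem.Int.le_floordiv_iff_mul_le hF2pos, (pvT_fib a b k).1]
      constructor <;> intro h <;> nlinarith
    have hOdd : ∀ b : Int, (-PySem.Int.floordiv (-((Nat.fib (2*k+2) : Int) * a)) ((Nat.fib (2*k+1) : Int) + (Nat.fib (2*k+2) : Int))) ≤ b ↔ 0 ≤ pvT a b (2*k+3) := by
      intro b
      rw [← hf3, pvCeilLe _ _ _ hF3pos, (pvT_fib a b k).2]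
      constructor <;> intro h <;> nlinarith
    have hC2 : ∀ b : Int, (lo ≤ b ∧ b ≤ nhi) ↔ (1 ≤ b ∧ b ≤ a ∧ pvGood a b (2*k+2)) := by
      intro b
      rw [hnhi_def]
      constructor
      · rintro ⟨h1, h2⟩
        have hb := (hiv b).mp ⟨h1, le_trans h2 (min_le_left _ _)⟩
        refine ⟨hb.1, hb.2.1, ?_⟩
        rw [show 2*k+2 = (2*k+1)+1 from rfl, pvGood_succ_iff a b (2*k+1) (by omega)]
        exact ⟨hb.2.2, (hEven b).mp (le_trans h2 (min_le_right _ _))⟩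
      · rintro ⟨h1, h2, h3⟩
        rw [show 2*k+2 = (2*k+1)+1 from rfl, pvGood_succ_iff a b (2*k+1) (by omega)] at h3
        have hb := (hiv b).mpr ⟨h1, h2, h3.1⟩
        exact ⟨hb.1, le_min hb.2 ((hEven b).mpr h3.2)⟩
    have hC3 : ∀ b : Int, (nlo ≤ b ∧ b ≤ nhi) ↔ (1 ≤ b ∧ b ≤ a ∧ pvGood a b (2*k+3)) := by
      intro b
      rw [hnlo_def]
      constructor
      · rintro ⟨h1, h2⟩
        have hb := (hC2 b).mp ⟨le_trans (le_max_left _ _) h1, h2⟩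
        refine ⟨hb.1, hb.2.1, ?_⟩
        rw [show 2*k+3 = (2*k+2)+1 from rfl, pvGood_succ_iff a b (2*k+2) (by omega)]
        exact ⟨hb.2.2, (hOdd b).mp (le_trans (le_max_right _ _) h1)⟩
      · rintro ⟨h1, h2, h3⟩
        rw [show 2*k+3 = (2*k+2)+1 from rfl, pvGood_succ_iff a b (2*k+2) (by omega)] at h3
        have hb := (hC2 b).mpr ⟨h1, h2, h3.1⟩
        exact ⟨max_le hb.1 ((hOdd b).mpr h3.2), hb.2⟩
    by_cases h1 : nhi < lo
    · have hres : (pvNarrowB (f+1) a (Nat.fib (2*k+1)) (Nat.fib (2*k+2)) lo hi).2 = hi := by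
        simp only [pvNarrowB]
        rw [if_pos (by rw [← hnhi_def]; exact h1)]
      rw [hres]
      refine ⟨2*k+1, ?_, ?_, ?_⟩
      · exact (hiv hi).mp ⟨hle, le_refl hi⟩
      · intro b hb1 hb2 hg
        exact ((hiv b).mpr ⟨hb1, hb2, hg⟩).2
      · intro b hb1 hb2 hg
        have := (hC2 b).mpr ⟨hb1, hb2, hg⟩
        omega
    · by_cases h2 : nlo > nhi
      · have hres : (pvNarrowB (f+1) a (Nat.fib (2*k+1)) (Nat.fib (2*k+2)) lo hi).2 = nhi := by
          simp only [pvNarrowB]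
          rw [← hnhi_def, ← hnlo_def, if_neg h1, if_pos h2]
        rw [hres]
        have hnn := (hC2 nhi).mp ⟨not_lt.mp h1, le_refl nhi⟩
        refine ⟨2*k+2, hnn, ?_, ?_⟩
        · intro b hb1 hb2 hg
          exact ((hC2 b).mpr ⟨hb1, hb2, hg⟩).2
        · intro b hb1 hb2 hg
          have := (hC3 b).mpr ⟨hb1, hb2, hg⟩
          omega
      · have hf4' : (Nat.fib (2*k+4) : Int) = (Nat.fib (2*k+2) : Int) + ((Nat.fib (2*k+1) : Int) + (Nat.fib (2*k+2) : Int)) := by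
          rw [hf4, hf3]
        have ihx := ih (k+1) nlo nhi (by omega)
          (fun b => by rw [show 2*(k+1)+1 = 2*k+3 from by ring]; exact hC3 b) (not_lt.mp h2)
        rw [show 2*(k+1)+1 = 2*k+3 from by ring, show 2*(k+1)+2 = 2*k+4 from by ring,
          hf3, hf4'] at ihx
        have hres : pvNarrowB (f+1) a (Nat.fib (2*k+1)) (Nat.fib (2*k+2)) lo hi
            = pvNarrowB f a ((Nat.fib (2*k+1) : Int) + (Nat.fib (2*k+2) : Int)) ((Nat.fib (2*k+2) : Int) + ((Nat.fib (2*k+1) : Int) + (Nat.fib (2*k+2) : Int))) nlo nhi := by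
          simp only [pvNarrowB]
          rw [← hnhi_def, ← hnlo_def, if_neg h1, if_neg h2]
        rw [hres]
        exact ihx

lemma pvTailB_eq_pvTailA : ∀ fuel seq, pvTailB fuel seq = pvTailA fuel seq := by
  intro fuel
  induction fuel with
  | zero => intro seq; rfl
  | succ f ih => intro seq; simp only [pvTailA, pvTailB]; split <;> simp [ih]

def pvStep (a : Int) (max_seq : List Int) (idx : Int) : List Int :=
  let seq := pvTailA 100 [a, idx]
  if seq.length > max_seq.length then seq else max_seq

lemma make_num_eq_foldl (a : Int) :
    make_num a = (PySem.List.pyRange a 0 (-1)).foldl (pvStep a) [] := rfl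

lemma pvSeq_eq (a b : Int) : pvTailA 100 [a, b] = [a, b] ++ pvChainT 100 a b := by
  simpa using pvTailA_append 100 [] a b

lemma pvFold_lt (a : Int) (L : Nat) : ∀ xs acc,
    (∀ b ∈ xs, (pvTailA 100 [a, b]).length < L) → acc.length < L →
    (List.foldl (pvStep a) acc xs).length < L := by
  intro xs
  induction xs with
  | nil => intro acc _ h; simpa using h
  | cons x xs ih =>
    intro acc hmem hacc
    simp only [List.foldl_cons]
    refine ih _ (fun b hb => hmem b (List.mem_cons_of_mem x hb)) ?_
    simp only [pvStep]
    split
    · exact hmem x List.mem_cons_self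
    · exact hacc

lemma pvFold_keep (a : Int) : ∀ xs acc,
    (∀ b ∈ xs, ¬((pvTailA 100 [a, b]).length > acc.length)) →
    List.foldl (pvStep a) acc xs = acc := by
  intro xs
  induction xs with
  | nil => intro acc _; rfl
  | cons x xs ih =>
    intro acc hmem
    simp only [List.foldl_cons, pvStep]
    rw [if_neg (hmem x List.mem_cons_self)]
    exact ih acc (fun b hb => hmem b (List.mem_cons_of_mem x hb))

lemma pvK_facts (a b : Int) (ha : 1 ≤ a) (haM : a ≤ 2147483648) (hb1 : 1 ≤ b) (hb2 : b ≤ a) :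
    pvGood a b ((pvChainT 100 a b).length + 1) ∧ ¬ pvGood a b ((pvChainT 100 a b).length + 2) := by
  have s1 := pvChainT_spec1 a b 100 0
  simp only [show pvT a b 0 = a from rfl, show pvT a b (0+1) = b from rfl] at s1
  obtain ⟨g, stop, lef⟩ := s1
  set K := (pvChainT 100 a b).length with hK
  have hgood : pvGood a b (K+1) := by
    intro j h2 hj
    have := g (j-2) (by omega)
    rw [show 0+2+(j-2) = j from by omega] at this
    exact this
  have hKle : K ≤ 46 := by
    by_contra hgt
    exact pvNoGood48 a b ha hb1 hb2 haM (pvGood_mono a b (by omega) hgood)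
  refine ⟨hgood, ?_⟩
  intro hbad
  have hstop := stop (by omega)
  rw [show 0+2+K = K+2 from by omega] at hstop
  have := hbad (K+2) (by omega) (le_refl _)
  omega

lemma pvK_ge (a b : Int) (mm : Nat) (hmm : mm ≤ 100) (hg : pvGood a b (mm+1)) :
    mm ≤ (pvChainT 100 a b).length := by
  have := pvChainT_spec2 a b 100 0 mm hmm (fun i hi => by
    have := hg (i+2) (by omega) (by omega)
    rwa [show 0+2+i = i+2 from by omega])
  simpa using this

theorem pvMain (start : Int) (hhiB : start ≤ 2147483648) :
    make_num start = make_num_alt start := by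
  by_cases hs : start < 1
  · rw [make_num_eq_foldl, PySem.List.pyRange_neg_one_eq_nil (by omega)]
    rw [make_num_alt, if_pos hs]
    rfl
  · rw [not_lt] at hs
    have hinv : ∀ b : Int, ((1:Int) ≤ b ∧ b ≤ start) ↔ (1 ≤ b ∧ b ≤ start ∧ pvGood start b (2*0+1)) := by
      intro b
      constructor
      · rintro ⟨h1, h2⟩
        exact ⟨h1, h2, fun j hj2 hj1 => by omega⟩
      · rintro ⟨h1, h2, _⟩
        exact ⟨h1, h2⟩
    have hspec := pvNarrow_rec start hs hhiB 100 0 1 start (by omega) hinv hs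
    rw [show ((Nat.fib (2*0+1) : Nat) : Int) = 1 from by norm_num,
        show ((Nat.fib (2*0+2) : Nat) : Int) = 1 from by norm_num] at hspec
    obtain ⟨m, ⟨hr1, hr2, hgr⟩, hmax, hempty⟩ := hspec
    set a := start with ha_def
    set r := (pvNarrowB 100 a 1 1 1 a).2 with hr_def
    have hm47 : m ≤ 47 := by
      by_contra hgt
      exact pvNoGood48 a r hs hr1 hr2 hhiB (pvGood_mono a r (by omega) hgr)
    have hKle : ∀ b : Int, 1 ≤ b → b ≤ a → (pvChainT 100 a b).length + 1 ≤ m := by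
      intro b hb1 hb2
      have hf := (pvK_facts a b hs hhiB hb1 hb2).1
      by_contra hgt
      exact hempty b hb1 hb2 (pvGood_mono a b (by omega) hf)
    have hKr : (pvChainT 100 a r).length = m - 1 := by
      have h1 := hKle r hr1 hr2
      have h2 : m - 1 ≤ (pvChainT 100 a r).length := by
        refine pvK_ge a r (m-1) (by omega) ?_
        rw [show m-1+1 = m from by omega]
        exact hgr
      omega
    have hlen_lt : ∀ b : Int, r < b → b ≤ a → (pvTailA 100 [a, b]).length < (pvTailA 100 [a, r]).length := by
      intro b hb1 hb2
      rw [pvSeq_eq, pvSeq_eq]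
      simp only [List.length_append, List.length_cons, List.length_nil]
      have hle := hKle b (by omega) hb2
      rcases Nat.lt_or_ge ((pvChainT 100 a b).length) (m-1) with h | h
      · omega
      · -- a tie in length would make b a second term that is Good through m, so b ≤ r: impossible
        exfalso
        have hg := (pvK_facts a b hs hhiB (by omega) hb2).1
        have hgm : pvGood a b m := pvGood_mono a b (by omega) hg
        have := hmax b (by omega) hb2 hgm
        omega
    have hlen_le : ∀ b : Int, 1 ≤ b → b ≤ a → ¬((pvTailA 100 [a, b]).length > (pvTailA 100 [a, r]).length) := by
      intro b hb1 hb2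
      rw [pvSeq_eq, pvSeq_eq]
      simp only [List.length_append, List.length_cons, List.length_nil]
      have h1 := hKle b hb1 hb2
      omega
    have hsplit : PySem.List.pyRange a 0 (-1)
        = PySem.List.pyRange a r (-1) ++ (r :: PySem.List.pyRange (r-1) 0 (-1)) := by
      rw [← PySem.List.pyRange_neg_one_cons (by omega)]
      rw [PySem.List.pyRange_neg_one_eq_reverse, PySem.List.pyRange_neg_one_eq_reverse,
        PySem.List.pyRange_neg_one_eq_reverse, ← List.reverse_append]
      rw [← PySem.List.pyRange_one_append (0+1) (r+1) (a+1) (by omega) (by omega)]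
    have hA : make_num a = pvTailA 100 [a, r] := by
      rw [make_num_eq_foldl, hsplit, List.foldl_append]
      have hacc1 : (List.foldl (pvStep a) [] (PySem.List.pyRange a r (-1))).length
          < (pvTailA 100 [a, r]).length := by
        refine pvFold_lt a _ _ _ ?_ ?_
        · intro b hb
          rw [PySem.List.mem_pyRange_neg_one] at hb
          exact hlen_lt b hb.1 hb.2
        · rw [pvSeq_eq]; simp
      rw [List.foldl_cons]
      have hstepr : pvStep a (List.foldl (pvStep a) [] (PySem.List.pyRange a r (-1))) r
          = pvTailA 100 [a, r] := by
        simp only [pvStep]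
        rw [if_pos hacc1]
      rw [hstepr]
      refine pvFold_keep a _ _ ?_
      intro b hb
      rw [PySem.List.mem_pyRange_neg_one] at hb
      exact hlen_le b (by omega) (by omega)
    have hB : make_num_alt a = pvTailA 100 [a, r] := by
      rw [make_num_alt, if_neg (by omega)]
      exact pvTailB_eq_pvTailA 100 _
    rw [hA, hB]

-- ===== VERDICT (by name: the statement is the Claim_ definition above) =====
theorem make_num_spec : Claim_equal_make_num := by
  intro start hDom
  unfold Dom_make_num pvDomInt at hDom
  rw [decide_eq_true_iff] at hDom
  unfold Spec_make_num
  exact pvMain start hDom.2
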